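-- pv_equiv track=rewrite | github.com/IlyaBylchinskiy/LabyPython | laby aois/import re 3.py | search_for_ecvivalense
-- ===== SOURCE A (Python) =====
-- def search_for_ecvivalense(pattern = "--------", search_arg = [], razryad = 0):
--     if len(pattern) != 8:   raise("length of the pattern should be 8 symbols")
--     i = 0
--     while i != len(search_arg):
--         if pattern[razryad] != '-':
--             if search_arg[i][razryad] != pattern[razryad]:
--                 search_arg.pop(i)
--             else:
--                 i += 1
--         else:
--             i +=1
--     razryad += 1
--     if razryad == 8 or len(search_arg) == 0: return search_arg
--     else: return search_for_ecvivalense(pattern, search_arg, razryad)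
-- ===== SOURCE B (Python) =====
-- def search_for_ecvivalense(pattern="--------", search_arg=[], razryad=0):
--     # Single pass over the elements (no in-place pops; equivalence is about the
--     # return value only -- A mutates search_arg in place, B does not).
--     if len(pattern) != 8:
--         raise ValueError("length of the pattern should be 8 symbols")
--
--     def keep(s):
--         return all(s[p] == pattern[p] for p in range(razryad, 8) if pattern[p] != '-')
--
--     return [s for s in search_arg if keep(s)]
-- ===== Notes on version B (the rewrite author's own statement) =====
-- stated objective: simpler
-- what changed: A's tail recursion over pattern positions with repeated in-place pop(i) scans is replaced by a single per-element filter that checks all constrained positions of each string at once (B builds a new list; A mutates search_arg in place).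
import Mathlib
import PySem

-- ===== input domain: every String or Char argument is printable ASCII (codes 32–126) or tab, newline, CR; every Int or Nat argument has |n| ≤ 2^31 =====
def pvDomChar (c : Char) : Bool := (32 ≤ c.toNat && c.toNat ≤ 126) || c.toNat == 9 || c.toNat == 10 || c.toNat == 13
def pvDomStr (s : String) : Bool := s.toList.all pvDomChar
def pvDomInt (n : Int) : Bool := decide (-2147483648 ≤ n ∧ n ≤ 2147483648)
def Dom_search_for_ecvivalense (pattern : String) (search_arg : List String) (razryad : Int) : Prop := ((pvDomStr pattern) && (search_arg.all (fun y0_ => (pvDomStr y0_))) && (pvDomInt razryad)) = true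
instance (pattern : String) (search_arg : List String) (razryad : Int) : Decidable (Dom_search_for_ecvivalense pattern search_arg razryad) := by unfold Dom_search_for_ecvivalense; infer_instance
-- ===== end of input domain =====

-- B replaces A's per-position recursive in-place pop loop by a single per-element filter
-- (objective: simpler); equivalence is about the RETURN value only — A mutates search_arg
-- in place, B builds a new list.

-- ===== PORT A =====
-- Errors (Python exceptions: the `raise` on a bad pattern length and IndexError from
-- pattern[razryad] / search_arg[i][razryad]) are modelled as `none`; Pre_ excludes them.

-- The inner `while i != len(search_arg)` loop of A.  The guard is written
-- `args.length ≤ i` instead of `i ≠ args.length`: from the entry point i = 0 the loop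
-- keeps i ≤ length, so the two guards coincide on every reachable state.  `fuel` is the
-- exact number of remaining iterations (length - i decreases by 1 every iteration,
-- whether i is incremented or an element is popped), so the fuel-exhausted branch is
-- unreachable; it only makes the recursion structural.
def pvInnerAGo (pat : List Char) (r : Int) (fuel : Nat) (args : List String) (i : Nat) :
    Option (List String) :=
  if args.length ≤ i then some args
  else
    match fuel with
    | 0 => none                                             -- unreachable: fuel = length - i
    | fuel' + 1 =>
      match PySem.List.pyGet? pat r with                    -- pattern[razryad]
      | none => none
      | some pc =>
        if pc ≠ '-' then
          match PySem.List.pyGet? args (i : Int) with       -- search_arg[i]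
          | none => none
          | some s =>
            match PySem.List.pyGet? s.toList r with         -- search_arg[i][razryad]
            | none => none
            | some sc =>
              if sc ≠ pc then
                match PySem.List.pop? args (i : Int) with   -- search_arg.pop(i)
                | none => none
                | some res => pvInnerAGo pat r fuel' res.2 i
              else pvInnerAGo pat r fuel' args (i + 1)
        else pvInnerAGo pat r fuel' args (i + 1)

def pvInnerA (pat : List Char) (r : Int) (args : List String) (i : Nat) : Option (List String) :=
  pvInnerAGo pat r (args.length - i) args i

-- the recursive body of A; `fuel = (8 - razryad).toNat` is exact on every reachable
-- recursive call (the function only recurses with razryad < 8), so the fuel-exhausted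
-- branch is unreachable; it only makes the recursion structural.
def pvRecAGo (pattern : String) (fuel : Nat) (args : List String) (razryad : Int) :
    Option (List String) :=
  if pattern.toList.length ≠ 8 then none                    -- raise(...)
  else
    match pvInnerA pattern.toList razryad args 0 with
    | none => none
    | some args' =>
      if razryad + 1 = 8 ∨ args' = [] then some args'
      else
        match fuel with
        | 0 => none                                         -- unreachable
        | fuel' + 1 => pvRecAGo pattern fuel' args' (razryad + 1)

def pvRecA (pattern : String) (args : List String) (razryad : Int) : Option (List String) :=
  pvRecAGo pattern (8 - razryad).toNat args razryad

def search_for_ecvivalense (pattern : String) (search_arg : List String) (razryad : Int) : List String :=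
  (pvRecA pattern search_arg razryad).getD []

-- ===== PORT B =====
-- Source B's keep(s): all(s[p] == pattern[p] for p in range(razryad, 8) if pattern[p] != '-')
def pvKeep (pat : List Char) (r : Int) (s : String) : Bool :=
  (((PySem.List.pyRange r 8 1).filter
      (fun p => PySem.List.pyGet? pat p != some '-')).all
    (fun p => PySem.List.pyGet? s.toList p == PySem.List.pyGet? pat p))

def search_for_ecvivalense_alt (pattern : String) (search_arg : List String) (razryad : Int) : List String :=
  if pattern.toList.length ≠ 8 then []                      -- raise ValueError(...)
  else search_arg.filter (pvKeep pattern.toList razryad)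

-- ===== PRECONDITION & SPEC =====
-- `pvNoRaise pat r s` says: for every constrained position p (pattern[p] ≠ '-') in
-- range(r, 8), if s matches the pattern at every constrained position before p
-- (so s is still in the list when position p is processed), then s[p] exists.
def pvNoRaise (pat : List Char) (r : Int) (s : String) : Bool :=
  (PySem.List.pyRange r 8 1).all fun p =>
    !(PySem.List.pyGet? pat p != some '-'
      && (PySem.List.pyRange r p 1).all
           (fun q => (PySem.List.pyGet? pat q == some '-')
             || (PySem.List.pyGet? s.toList q == PySem.List.pyGet? pat q))
      && !(PySem.List.pyGet? s.toList p).isSome)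

-- Pre_ holds exactly when the Python A returns normally: pattern has length 8 and either
-- the list is empty, or razryad indexes pattern (Python wraps -8 ≤ razryad < 0) and no
-- element still present when a constrained position is processed is too short for it
-- (otherwise IndexError).  Pre_ excludes no input on which A returns.
def Pre_search_for_ecvivalense (pattern : String) (search_arg : List String) (razryad : Int) : Prop :=
  pattern.toList.length = 8 ∧
  (search_arg = [] ∨
    (-8 ≤ razryad ∧ razryad < 8 ∧
      ∀ s ∈ search_arg, pvNoRaise pattern.toList razryad s = true))

instance (pattern : String) (search_arg : List String) (razryad : Int) : Decidable (Pre_search_for_ecvivalense pattern search_arg razryad) := by unfold Pre_search_for_ecvivalense; infer_instance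

def pvWitness_search_for_ecvivalense : String × List String × Int := ("ab------", ["abcd", "xxyy", "aby"], 0)

def Spec_search_for_ecvivalense (pattern : String) (search_arg : List String) (razryad : Int) (out : List String) : Prop := out = search_for_ecvivalense_alt pattern search_arg razryad
instance (pattern : String) (search_arg : List String) (razryad : Int) (out : List String) : Decidable (Spec_search_for_ecvivalense pattern search_arg razryad out) := by unfold Spec_search_for_ecvivalense; infer_instance

-- ===== CLAIM (what is proved, stated in full; the proofs are below) =====
def Claim_equal_search_for_ecvivalense : Prop := ∀ (pattern : String) (search_arg : List String) (razryad : Int), Dom_search_for_ecvivalense pattern search_arg razryad → Pre_search_for_ecvivalense pattern search_arg razryad → Spec_search_for_ecvivalense pattern search_arg razryad (search_for_ecvivalense pattern search_arg razryad)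

-- ===== LEMMAS AND PROOFS =====

-- A's inner loop on an empty list returns immediately
theorem pvInnerAGo_nil (pat : List Char) (r : Int) (fuel : Nat) (i : Nat) :
    pvInnerAGo pat r fuel [] i = some [] := by
  rw [pvInnerAGo.eq_def]; simp

theorem pvInnerA_nil (pat : List Char) (r : Int) (i : Nat) :
    pvInnerA pat r [] i = some [] := pvInnerAGo_nil pat r _ i

-- unconstrained position: the inner loop keeps the list unchanged
theorem pvInnerAGo_dash (pat : List Char) (r : Int) (h : PySem.List.pyGet? pat r = some '-') :
    ∀ (fuel : Nat) (args : List String) (i : Nat), args.length - i ≤ fuel →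
      pvInnerAGo pat r fuel args i = some args := by
  intro fuel
  induction fuel with
  | zero =>
    intro args i hf
    rw [pvInnerAGo.eq_def, if_pos (by omega)]
  | succ k IH =>
    intro args i hf
    by_cases hle : args.length ≤ i
    · rw [pvInnerAGo.eq_def, if_pos hle]
    · rw [pvInnerAGo.eq_def, if_neg hle]
      dsimp only
      rw [h]
      dsimp only
      simp only [ne_eq, not_true_eq_false, if_false]
      exact IH args (i + 1) (by omega)

theorem pvInnerA_dash (pat : List Char) (r : Int) (h : PySem.List.pyGet? pat r = some '-')
    (args : List String) (i : Nat) :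
    pvInnerA pat r args i = some args :=
  pvInnerAGo_dash pat r h _ args i le_rfl

-- constrained position with all needed characters present: the inner loop filters
theorem pvInnerAGo_filter (pat : List Char) (r : Int) (pc : Char)
    (h : PySem.List.pyGet? pat r = some pc) (hpc : pc ≠ '-') :
    ∀ (fuel : Nat) (args : List String) (i : Nat), args.length - i ≤ fuel →
      (∀ s ∈ args.drop i, (PySem.List.pyGet? s.toList r).isSome) →
      pvInnerAGo pat r fuel args i =
        some (args.take i ++ (args.drop i).filter
          (fun s => PySem.List.pyGet? s.toList r == some pc)) := by
  intro fuel
  induction fuel with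
  | zero =>
    intro args i hf hs
    have hle : args.length ≤ i := by omega
    rw [pvInnerAGo.eq_def, if_pos hle]
    simp [List.drop_eq_nil_of_le hle, List.take_of_length_le hle]
  | succ k IH =>
    intro args i hf hs
    by_cases hle : args.length ≤ i
    · rw [pvInnerAGo.eq_def, if_pos hle]
      simp [List.drop_eq_nil_of_le hle, List.take_of_length_le hle]
    · have hlt : i < args.length := by omega
      have hdrop : args[i] :: args.drop (i + 1) = args.drop i := List.getElem_cons_drop ..
      have hmem : args[i] ∈ args.drop i := by rw [← hdrop]; exact List.mem_cons_self
      obtain ⟨sc, hsc⟩ := Option.isSome_iff_exists.mp (hs _ hmem)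
      rw [pvInnerAGo.eq_def, if_neg hle]
      dsimp only
      rw [h]
      dsimp only
      rw [if_pos hpc, PySem.List.pyGet?_natCast, List.getElem?_eq_getElem hlt]
      dsimp only
      rw [hsc]
      dsimp only
      by_cases hne : sc = pc
      · rw [if_neg (by simp [hne])]
        have IH2 := IH args (i + 1) (by omega)
          (fun s hsmem => hs s (by rw [← hdrop]; exact List.mem_cons_of_mem _ hsmem))
        rw [IH2, ← hdrop, List.filter_cons_of_pos (by simp [hsc, hne])]
        rw [List.take_add_one, List.getElem?_eq_getElem hlt]
        simp only [Option.toList_some, List.append_assoc, List.cons_append, List.nil_append]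
      · rw [if_pos (by simp [hne]), PySem.List.pop?_natCast args i hlt]
        dsimp only
        have hdropE : (args.eraseIdx i).drop i = args.drop (i + 1) := by
          rw [List.eraseIdx_eq_take_drop_succ]
          exact List.drop_left' (by rw [List.length_take]; omega)
        have htakeE : (args.eraseIdx i).take i = args.take i := by
          rw [List.eraseIdx_eq_take_drop_succ]
          exact List.take_left' (by rw [List.length_take]; omega)
        have hE : (args.eraseIdx i).length = args.length - 1 := List.length_eraseIdx_of_lt hlt
        have IH2 := IH (args.eraseIdx i) i (by omega)
          (fun s hsmem => hs s (by rw [← hdrop]; exact List.mem_cons_of_mem _ (by rwa [hdropE] at hsmem)))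
        rw [IH2, hdropE, htakeE, ← hdrop, List.filter_cons_of_neg (by simp [hsc, hne])]

theorem pvInnerA_filter (pat : List Char) (r : Int) (pc : Char)
    (h : PySem.List.pyGet? pat r = some pc) (hpc : pc ≠ '-')
    (args : List String) (i : Nat)
    (hs : ∀ s ∈ args.drop i, (PySem.List.pyGet? s.toList r).isSome) :
    pvInnerA pat r args i =
      some (args.take i ++ (args.drop i).filter
        (fun s => PySem.List.pyGet? s.toList r == some pc)) :=
  pvInnerAGo_filter pat r pc h hpc _ args i le_rfl hs

theorem pvKeep_ge (pat : List Char) (r : Int) (s : String) (hr : 8 ≤ r) :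
    pvKeep pat r s = true := by
  simp [pvKeep, PySem.List.pyRange_one_eq_nil hr]

theorem pvKeep_dash (pat : List Char) (r : Int) (s : String) (hr : r < 8)
    (h : PySem.List.pyGet? pat r = some '-') :
    pvKeep pat r s = pvKeep pat (r + 1) s := by
  simp [pvKeep, PySem.List.pyRange_one_cons hr, h]

theorem pvKeep_cons (pat : List Char) (r : Int) (s : String) (hr : r < 8)
    (h : PySem.List.pyGet? pat r ≠ some '-') :
    pvKeep pat r s =
      ((PySem.List.pyGet? s.toList r == PySem.List.pyGet? pat r) && pvKeep pat (r + 1) s) := by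
  simp [pvKeep, PySem.List.pyRange_one_cons hr, h]

-- Prop reading of the Bool pvNoRaise
theorem pvNoRaise_iff (pat : List Char) (r : Int) (s : String) :
    pvNoRaise pat r s = true ↔
      ∀ p : Int, r ≤ p → p < 8 → PySem.List.pyGet? pat p ≠ some '-' →
        (∀ q : Int, r ≤ q → q < p → PySem.List.pyGet? pat q ≠ some '-' →
          PySem.List.pyGet? s.toList q = PySem.List.pyGet? pat q) →
        (PySem.List.pyGet? s.toList p).isSome := by
  unfold pvNoRaise
  simp only [List.all_eq_true, PySem.List.mem_pyRange_one]
  constructor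
  · intro h p hp1 hp2 hc hs
    have := h p ⟨hp1, hp2⟩
    simp at this
    rcases this with (h' | ⟨x, ⟨hx1, hx2⟩, hx3, hx4⟩) | h'
    · exact absurd h' hc
    · exact absurd (hs x hx1 hx2 hx3) hx4
    · exact h'
  · intro h p hp
    simp
    rcases eq_or_ne (PySem.List.pyGet? pat p) (some '-') with h1 | h1
    · exact Or.inl (Or.inl h1)
    · by_cases h2 : ∀ q : Int, r ≤ q → q < p → PySem.List.pyGet? pat q ≠ some '-' →
          PySem.List.pyGet? s.toList q = PySem.List.pyGet? pat q
      · exact Or.inr (h p hp.1 hp.2 h1 h2)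
      · push Not at h2
        obtain ⟨x, hx1, hx2, hx3, hx4⟩ := h2
        exact Or.inl (Or.inr ⟨x, ⟨hx1, hx2⟩, hx3, hx4⟩)

theorem pvNoRaise_step (pat : List Char) (r : Int) (s : String)
    (h : pvNoRaise pat r s = true)
    (hm : PySem.List.pyGet? pat r ≠ some '-' →
      PySem.List.pyGet? s.toList r = PySem.List.pyGet? pat r) :
    pvNoRaise pat (r + 1) s = true := by
  rw [pvNoRaise_iff] at h ⊢
  intro p hp1 hp2 hc hs
  apply h p (by omega) hp2 hc
  intro q hq1 hq2 hq3
  rcases eq_or_ne q r with rfl | hne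
  · exact hm hq3
  · exact hs q (by omega) hq2 hq3

theorem pvNoRaise_head (pat : List Char) (r : Int) (s : String)
    (h : pvNoRaise pat r s = true) (hr : r < 8)
    (hc : PySem.List.pyGet? pat r ≠ some '-') :
    (PySem.List.pyGet? s.toList r).isSome := by
  exact (pvNoRaise_iff pat r s).mp h r le_rfl hr hc (fun q hq1 hq2 _ => absurd hq2 (by omega))

-- splitting B's filter at a constrained position
theorem pvFilter_split (pat : List Char) (r : Int) (pc : Char) (hr : r < 8)
    (hc : PySem.List.pyGet? pat r = some pc) (hpc : pc ≠ '-') (args : List String) :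
    args.filter (pvKeep pat r) =
      (args.filter (fun s => PySem.List.pyGet? s.toList r == some pc)).filter (pvKeep pat (r + 1)) := by
  rw [List.filter_filter]
  apply List.filter_congr
  intro s _
  rw [pvKeep_cons pat r s hr (by simp [hc, hpc]), hc, Bool.and_comm]

theorem pvRecAGo_nil (pattern : String) (fuel : Nat) (r : Int)
    (hlen : pattern.toList.length = 8) :
    pvRecAGo pattern fuel [] r = some [] := by
  rw [pvRecAGo.eq_def, if_neg (by simp [hlen])]
  split <;> simp_all [pvInnerA_nil]

-- main invariant: A's recursion computes B's filter
theorem pvMain (pattern : String) (hlen : pattern.toList.length = 8) :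
    ∀ (n : Nat) (args : List String) (r : Int), (8 - r).toNat ≤ n →
      (args ≠ [] → -8 ≤ r ∧ r < 8) →
      (∀ s ∈ args, pvNoRaise pattern.toList r s = true) →
      pvRecAGo pattern n args r = some (args.filter (pvKeep pattern.toList r)) := by
  intro n
  induction n with
  | zero =>
    intro args r hn hb hnr
    cases args with
    | nil => rw [pvRecAGo_nil pattern _ r hlen]; simp
    | cons a as => exact absurd (hb (by simp)).2 (by omega)
  | succ n IH =>
    intro args r hn hb hnr
    cases args with
    | nil => rw [pvRecAGo_nil pattern _ r hlen]; simp
    | cons a as =>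
    obtain ⟨hr1, hr2⟩ := hb (by simp)
    obtain ⟨pc, hc⟩ : ∃ pc, PySem.List.pyGet? pattern.toList r = some pc := by
      cases hc : PySem.List.pyGet? pattern.toList r with
      | none =>
        exfalso
        rw [PySem.List.pyGet?_eq_none_iff] at hc
        simp [PySem.Raise.InRange, hlen] at hc
        omega
      | some pc => exact ⟨pc, rfl⟩
    rw [pvRecAGo.eq_def, if_neg (by simp [hlen])]
    by_cases hdash : pc = '-'
    · subst hdash
      split
      · rename_i hI
        rw [pvInnerA_dash _ _ hc] at hI
        cases hI
      · rename_i args' hI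
        rw [pvInnerA_dash _ _ hc] at hI
        injection hI with hI
        subst hI
        by_cases hstop : r + 1 = 8 ∨ a :: as = []
        · rw [if_pos hstop]
          have h7 : r = 7 := by
            rcases hstop with h8 | hnil
            · omega
            · cases hnil
          subst h7
          have : ∀ s ∈ a :: as, pvKeep pattern.toList 7 s = true := fun s _ => by
            rw [pvKeep_dash _ _ _ (by omega) hc]
            exact pvKeep_ge _ _ _ (by omega)
          rw [List.filter_eq_self.mpr this]
        · rw [if_neg hstop]
          dsimp only
          push Not at hstop
          have hIH := IH (a :: as) (r + 1) (by omega) (fun _ => ⟨by omega, by omega⟩)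
            (fun s hs => pvNoRaise_step _ _ _ (hnr s hs) (fun hcon => absurd hc hcon))
          rw [hIH]
          congr 1
          exact List.filter_congr fun s _ => (pvKeep_dash _ _ _ (by omega) hc).symm
    · have hsome : ∀ s ∈ a :: as, (PySem.List.pyGet? s.toList r).isSome :=
        fun s hs => pvNoRaise_head _ _ _ (hnr s hs) hr2 (by simp [hc, hdash])
      have hfil := pvInnerA_filter pattern.toList r pc hc hdash (a :: as) 0
        (by simpa using hsome)
      simp only [List.take_zero, List.drop_zero, List.nil_append] at hfil
      split
      · rename_i hI
        rw [hfil] at hI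
        cases hI
      · rename_i args' hI
        rw [hfil] at hI
        injection hI with hI
        subst hI
        by_cases hstop : r + 1 = 8 ∨
            (a :: as).filter (fun s => PySem.List.pyGet? s.toList r == some pc) = []
        · rw [if_pos hstop]
          rcases hstop with h8 | hF
          · have h7 : r = 7 := by omega
            subst h7
            rw [pvFilter_split pattern.toList 7 pc (by omega) hc hdash]
            exact congrArg some
              (List.filter_eq_self.mpr (fun s _ => pvKeep_ge _ _ _ (by omega))).symm
          · rw [pvFilter_split pattern.toList r pc hr2 hc hdash, hF]
            simp
        · rw [if_neg hstop]
          dsimp only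
          push Not at hstop
          have hIH := IH ((a :: as).filter (fun s => PySem.List.pyGet? s.toList r == some pc)) (r + 1) (by omega) (fun _ => ⟨by omega, by omega⟩)
            (fun s hs => pvNoRaise_step _ _ _ (hnr s (List.mem_of_mem_filter hs))
              (fun _ => by
                have hf := List.of_mem_filter hs
                simp at hf
                rw [hf, hc]))
          rw [hIH, ← pvFilter_split pattern.toList r pc hr2 hc hdash]

-- ===== VERDICT (by name: the statement is the Claim_ definition above) =====
theorem search_for_ecvivalense_spec : Claim_equal_search_for_ecvivalense := by
  intro pattern search_arg razryad _ hpre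
  obtain ⟨hlen, hpre⟩ := hpre
  unfold Spec_search_for_ecvivalense search_for_ecvivalense search_for_ecvivalense_alt
  rw [if_neg (by simp [hlen])]
  have hmain : pvRecA pattern search_arg razryad =
      some (search_arg.filter (pvKeep pattern.toList razryad)) := by
    rcases hpre with h | ⟨h1, h2, h3⟩
    · subst h
      unfold pvRecA
      rw [pvRecAGo_nil pattern _ razryad hlen]
      simp
    · unfold pvRecA
      exact pvMain pattern hlen (8 - razryad).toNat search_arg razryad le_rfl (fun _ => ⟨h1, h2⟩) h3
  rw [hmain]
  rfl
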